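-- pv_equiv track=rewrite | github.com/wanawin/filtergroupmkr | dc_5_filter_compatibility_auditor_minimal_disable_sets_≤_3.py | make_hot_cold_due
-- ===== SOURCE A (Python) =====
-- from collections import Counter, defaultdict
-- from typing import Dict, List, Tuple, Set
--
-- def make_hot_cold_due(history: List[List[int]], k_hotcold: int = 20) -> Tuple[Set[int], Set[int], Set[int]]:
--     """Return (hot_digits_20, cold_digits_20, due_digits_2).
--     - hot/cold computed over last k_hotcold seeds (digits flattened)
--     - due = digits absent in last 2 seeds
--     """
--     flat = [d for row in history[-k_hotcold:] for d in row]
--     cnt = Counter(flat)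
--     if cnt:
--         # Top 6 hot by frequency (ties naturally included by counts ordering)
--         most = cnt.most_common()
--         # Determine the 6th-place frequency to include ties
--         topk = 6
--         thresh = most[topk-1][1] if len(most) >= topk else (most[-1][1] if most else 0)
--         hot = {d for d, c in most if c >= thresh}
--         # Bottom 4 cold by frequency (include ties at the boundary)
--         least = sorted(cnt.items(), key=lambda x: (x[1], x[0]))
--         coldk = 4
--         if least:
--             cth = least[coldk-1][1] if len(least) >= coldk else least[0][1]
--             cold = {d for d, c in least if c <= cth}
--         else:
--             cold = set()
--     else:
--         hot, cold = set(), set()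
--
--     # Due digits over last 2 seeds (absent in union)
--     last2 = set(d for row in history[-2:] for d in row)
--     due = set(range(10)) - last2
--     return hot, cold, due
-- ===== SOURCE B (Python) =====
-- def make_hot_cold_due(history, k_hotcold=20):
--     """Rank selection without any sorting: count digits, then count counts
--     (multiplicity of each count value); a digit is hot when fewer than 6 digits
--     beat its count, cold when fewer than coldk digits undercut it."""
--     counts = {}
--     for row in history[-k_hotcold:]:
--         for d in row:
--             counts[d] = counts.get(d, 0) + 1
--     mult = {}
--     for c in counts.values():
--         mult[c] = mult.get(c, 0) + 1
--     coldk = 4 if len(counts) >= 4 else 1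
--     hot = {d for d, c in counts.items()
--            if sum(m for v, m in mult.items() if v > c) < 6}
--     cold = {d for d, c in counts.items()
--             if sum(m for v, m in mult.items() if v < c) < coldk}
--     due = {d for d in range(10) if all(d not in row for row in history[-2:])}
--     return hot, cold, due
-- ===== Notes on version B (the rewrite author's own statement) =====
-- stated objective: alternative
-- what changed: A sorts the (digit,count) items twice (most_common descending and sorted by (count,digit)) and reads hot/cold thresholds off the sorted lists by index; B never sorts: it builds a count-of-counts table and selects by rank, marking a digit hot when fewer than 6 digits have a strictly larger count and cold when fewer than 4 (or 1, with under 4 distinct digits) have a strictly smaller one, and computes due by testing each of the ten digits directly against the last two rows.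
import Mathlib
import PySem

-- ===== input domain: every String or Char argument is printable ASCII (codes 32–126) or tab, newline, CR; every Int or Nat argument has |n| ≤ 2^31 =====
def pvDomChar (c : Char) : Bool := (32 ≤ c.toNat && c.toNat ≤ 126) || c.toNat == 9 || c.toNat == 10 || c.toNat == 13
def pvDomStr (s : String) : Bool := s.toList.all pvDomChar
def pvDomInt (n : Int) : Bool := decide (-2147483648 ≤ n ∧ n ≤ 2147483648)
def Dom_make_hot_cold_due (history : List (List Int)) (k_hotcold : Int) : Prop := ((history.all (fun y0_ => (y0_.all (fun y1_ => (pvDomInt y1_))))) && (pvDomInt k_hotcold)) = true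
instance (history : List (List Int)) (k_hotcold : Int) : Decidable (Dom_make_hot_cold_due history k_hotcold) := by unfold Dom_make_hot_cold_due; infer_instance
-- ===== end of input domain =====

-- B replaces A's two sorts of the (digit,count) items by sort-free rank selection over a
-- count-of-counts table; same return value (the three Python sets are represented canonically,
-- as their distinct elements in ascending order, in both ports).
def pvCanonSet (s : List Int) : List Int := PySem.List.sorted s (fun x => x)

-- ===== PORT A =====
def make_hot_cold_due (history : List (List Int)) (k_hotcold : Int) : List Int × List Int × List Int :=
  let flat := (PySem.List.slice history (some (-k_hotcold)) none).flatMap (fun row => row)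
  let cnt := PySem.Dict.counter flat
  let hc :=
    if cnt.size ≠ 0 then
      let most := PySem.List.sorted cnt.items (fun p => p.2) true
      -- most[5] / most[-1] / least[3] / least[0] are guarded in range, so pyGetD's default is never read
      let thresh := if 6 ≤ most.length then (PySem.List.pyGetD most 5 (0, 0)).2
                    else if most.length ≠ 0 then (PySem.List.pyGetD most (-1) (0, 0)).2 else 0
      let hot := PySem.Set.ofList ((most.filter (fun p => thresh ≤ p.2)).map (fun p => p.1))
      let least := PySem.List.sorted2 cnt.items (fun p => p.2) (fun p => p.1)
      let cold := if least.length ≠ 0 then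
          let cth := if 4 ≤ least.length then (PySem.List.pyGetD least 3 (0, 0)).2
                     else (PySem.List.pyGetD least 0 (0, 0)).2
          PySem.Set.ofList ((least.filter (fun p => p.2 ≤ cth)).map (fun p => p.1))
        else []
      (hot, cold)
    else ([], [])
  let last2 := PySem.Set.ofList ((PySem.List.slice history (some (-2)) none).flatMap (fun row => row))
  let due := PySem.Set.diff (PySem.Set.ofList (PySem.List.pyRange 0 10 1)) last2
  (pvCanonSet hc.1, pvCanonSet hc.2, pvCanonSet due)

-- ===== PORT B =====
def make_hot_cold_due_alt (history : List (List Int)) (k_hotcold : Int) : List Int × List Int × List Int :=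
  let counts := (PySem.List.slice history (some (-k_hotcold)) none).foldl
      (fun d row => row.foldl (fun d x => d.insert x (d.getD x 0 + 1)) d) (PySem.Dict.empty : PySem.Dict Int Int)
  let mult := counts.values.foldl (fun d c => d.insert c (d.getD c 0 + 1)) (PySem.Dict.empty : PySem.Dict Int Int)
  let coldk : Int := if 4 ≤ counts.size then 4 else 1
  let hot := PySem.Set.ofList ((counts.items.filter
      (fun p => ((mult.items.filter (fun q => p.2 < q.1)).map (fun q => q.2)).sum < 6)).map (fun p => p.1))
  let cold := PySem.Set.ofList ((counts.items.filter
      (fun p => ((mult.items.filter (fun q => q.1 < p.2)).map (fun q => q.2)).sum < coldk)).map (fun p => p.1))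
  let due := (PySem.List.pyRange 0 10 1).filter
      (fun d => (PySem.List.slice history (some (-2)) none).all (fun row => !row.contains d))
  (pvCanonSet hot, pvCanonSet cold, due)

-- ===== PRECONDITION & SPEC =====
def Spec_make_hot_cold_due (history : List (List Int)) (k_hotcold : Int) (out : List Int × List Int × List Int) : Prop := out = make_hot_cold_due_alt history k_hotcold
instance (history : List (List Int)) (k_hotcold : Int) (out : List Int × List Int × List Int) : Decidable (Spec_make_hot_cold_due history k_hotcold out) := by unfold Spec_make_hot_cold_due; infer_instance

-- ===== CLAIM (what is proved, stated in full; the proofs are below) =====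
def Claim_equal_make_hot_cold_due : Prop := ∀ (history : List (List Int)) (k_hotcold : Int), Dom_make_hot_cold_due history k_hotcold → Spec_make_hot_cold_due history k_hotcold (make_hot_cold_due history k_hotcold)

-- ===== LEMMAS AND PROOFS =====

-- B's nested counting loop is the counting loop over the flattened window.
theorem pvFoldlNested (w : List (List Int)) (d : PySem.Dict Int Int) :
    w.foldl (fun d row => row.foldl (fun d x => d.insert x (d.getD x 0 + 1)) d) d
      = (w.flatMap (fun row => row)).foldl (fun d x => d.insert x (d.getD x 0 + 1)) d := by
  induction w generalizing d with
  | nil => rfl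
  | cons r t ih => simp [List.flatMap_cons, List.foldl_append, ih]

-- insertBy keeps a Pairwise invariant when `before`/its negation both imply the order.
theorem pvInsertBy_pairwise {α : Type} (before : α → α → Bool) (le : α → α → Prop)
    (htrans : ∀ a b c, le a b → le b c → le a c)
    (hbef : ∀ a b, before a b = true → le a b)
    (hnbef : ∀ a b, before a b = false → le b a)
    (x : α) (l : List α) (hl : l.Pairwise le) :
    (PySem.List.insertBy before x l).Pairwise le := by
  induction l with
  | nil => simp [PySem.List.insertBy]
  | cons y ys ih =>
    rcases List.pairwise_cons.mp hl with ⟨hy, hys⟩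
    by_cases hb : before x y = true
    · simp only [PySem.List.insertBy, hb, if_true]
      refine List.pairwise_cons.mpr ⟨?_, hl⟩
      intro z hz
      rcases List.mem_cons.mp hz with rfl | hz
      · exact hbef _ _ hb
      · exact htrans _ _ _ (hbef _ _ hb) (hy _ hz)
    · simp only [PySem.List.insertBy, hb]
      refine List.pairwise_cons.mpr ⟨?_, ih hys⟩
      intro z hz
      rcases (PySem.List.mem_insertBy before x z ys).mp hz with rfl | hz
      · exact hnbef _ _ (by simpa using hb)
      · exact hy _ hz

theorem pvFoldlInsertBy_pairwise {α : Type} (before : α → α → Bool) (le : α → α → Prop)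
    (htrans : ∀ a b c, le a b → le b c → le a c)
    (hbef : ∀ a b, before a b = true → le a b)
    (hnbef : ∀ a b, before a b = false → le b a)
    (xs : List α) (acc : List α) (hacc : acc.Pairwise le) :
    (xs.foldl (fun acc x => PySem.List.insertBy before x acc) acc).Pairwise le := by
  induction xs generalizing acc with
  | nil => exact hacc
  | cons x t ih => exact ih _ (pvInsertBy_pairwise before le htrans hbef hnbef x acc hacc)

-- sorted2 by (snd, fst) is non-decreasing in snd.
theorem pvSorted2_pairwise_snd (items : List (Int × Int)) :
    (PySem.List.sorted2 items (fun p => p.2) (fun p => p.1)).Pairwise (fun a b => a.2 ≤ b.2) := by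
  refine pvFoldlInsertBy_pairwise
    (fun a b => decide (a.2 < b.2) || (!decide (b.2 < a.2) && decide (a.1 < b.1)))
    (fun a b => a.2 ≤ b.2) (fun a b c h1 h2 => le_trans h1 h2) ?_ ?_ items [] (by simp)
  · intro a b h
    simp only [Bool.or_eq_true, Bool.and_eq_true, Bool.not_eq_true', decide_eq_true_eq,
      decide_eq_false_iff_not] at h
    rcases h with h | ⟨h, _⟩ <;> omega
  · intro a b h
    simp only [Bool.or_eq_false_iff, Bool.and_eq_false_iff, Bool.not_eq_false',
      decide_eq_false_iff_not, decide_eq_true_eq] at h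
    omega

-- two ascending Int lists that are permutations are equal
theorem pvAscEq (l1 l2 : List Int) (hp : l1.Perm l2)
    (h1 : l1.Pairwise (· ≤ ·)) (h2 : l2.Pairwise (· ≤ ·)) : l1 = l2 :=
  List.Perm.eq_of_pairwise (fun _ _ _ _ ha hb => le_antisymm ha hb) h1 h2 hp

-- two descending Int lists that are permutations are equal
theorem pvDescEq (l1 l2 : List Int) (hp : l1.Perm l2)
    (h1 : l1.Pairwise (fun a b => b ≤ a)) (h2 : l2.Pairwise (fun a b => b ≤ a)) : l1 = l2 :=
  List.Perm.eq_of_pairwise (fun _ _ _ _ ha hb => le_antisymm hb ha) h1 h2 hp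

-- snds of A's `least` = the sorted counts
theorem pvLeastSnd (items : List (Int × Int)) :
    (PySem.List.sorted2 items (fun p => p.2) (fun p => p.1)).map (fun p => p.2)
      = PySem.List.sorted (items.map (fun p => p.2)) (fun c => c) := by
  refine pvAscEq _ _ ?_ ?_ ?_
  · exact ((PySem.List.sorted2_perm items _ _ false).map _).trans
      (PySem.List.sorted_perm (items.map (fun p => p.2)) (fun c => c) false).symm
  · exact (List.pairwise_map).mpr (pvSorted2_pairwise_snd items)
  · exact PySem.List.sorted_pairwise (items.map (fun p => p.2)) (fun c => c)

-- snds of A's `most` = the sorted counts, reversed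
theorem pvMostSnd (items : List (Int × Int)) :
    (PySem.List.sorted items (fun p => p.2) true).map (fun p => p.2)
      = (PySem.List.sorted (items.map (fun p => p.2)) (fun c => c)).reverse := by
  refine pvDescEq _ _ ?_ ?_ ?_
  · refine ((PySem.List.sorted_perm items _ true).map _).trans ?_
    exact ((List.reverse_perm _).trans
      (PySem.List.sorted_perm (items.map (fun p => p.2)) (fun c => c) false)).symm
  · exact (List.pairwise_map).mpr (PySem.List.sorted_pairwise_rev items (fun p => p.2))
  · exact (List.pairwise_reverse).mpr
      (PySem.List.sorted_pairwise (items.map (fun p => p.2)) (fun c => c))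

-- canonical set of a dedup is permutation-invariant
theorem pvCanonOfList_perm (l1 l2 : List Int) (h : l1.Perm l2) :
    pvCanonSet (PySem.Set.ofList l1) = pvCanonSet (PySem.Set.ofList l2) := by
  refine PySem.List.sorted_eq_sorted_of_perm _ _ _ (fun a b hab => hab) ?_
  refine (List.perm_ext_iff_of_nodup (PySem.Set.nodup_ofList l1) (PySem.Set.nodup_ofList l2)).mpr ?_
  intro a
  simp only [PySem.Set.mem_ofList]
  exact ⟨fun ha => h.mem_iff.mp ha, fun ha => h.mem_iff.mpr ha⟩

-- the two filtered digit sets agree (A filters a sorted copy, B the dict items)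
theorem pvFilterSetEq (l2 items : List (Int × Int)) (hperm : l2.Perm items) (p : Int × Int → Bool) :
    pvCanonSet (PySem.Set.ofList ((l2.filter p).map (fun q => q.1)))
      = pvCanonSet (PySem.Set.ofList ((items.filter p).map (fun q => q.1))) :=
  pvCanonOfList_perm _ _ ((hperm.filter p).map _)

-- due: A's canonical (range-10 minus union of the last two rows) is B's direct filter
theorem pvDueEq (w2 : List (List Int)) :
    pvCanonSet (PySem.Set.diff (PySem.Set.ofList (PySem.List.pyRange 0 10 1))
        (PySem.Set.ofList (w2.flatMap (fun row => row))))
      = (PySem.List.pyRange 0 10 1).filter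
          (fun d => w2.all (fun row => !row.contains d)) := by
  have hbase : PySem.Set.ofList (PySem.List.pyRange 0 10 1) = PySem.List.pyRange 0 10 1 := by decide
  have hcong : (PySem.List.pyRange 0 10 1).filter
        (fun x => !(PySem.Set.ofList (w2.flatMap (fun row => row))).contains x)
      = (PySem.List.pyRange 0 10 1).filter (fun d => w2.all (fun row => !row.contains d)) := by
    refine List.filter_congr ?_
    intro d _
    have h1 : (PySem.Set.ofList (w2.flatMap (fun row => row))).contains d
        = w2.any (fun row => row.contains d) := by
      rw [Bool.eq_iff_iff]
      simp [List.contains_eq_mem, PySem.Set.mem_ofList, List.any_eq_true]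
    rw [Bool.eq_iff_iff]
    simp only [Bool.not_eq_true', h1]
    simp [List.all_eq_true]
  rw [PySem.Set.diff, hbase, hcong]
  simp only [pvCanonSet]
  exact PySem.List.sorted_eq_self_of_pairwise _ _
    (List.Pairwise.filter _ (by decide))

-- snd of an element, read through a map-snd equation
theorem pvSndGet (l : List (Int × Int)) (q : List Int) (h : l.map (fun p => p.2) = q)
    (i : Nat) (hi : i < l.length) :
    (l[i]'hi).2 = q[i]'(by rw [← h]; simpa using hi) := by
  subst h; simp

-- over a nodup index list, the 0/1 indicator of x sums to [p x]
theorem pvSumInd (s : List Int) (hs : s.Nodup) (x : Int) (hx : x ∈ s) (p : Int → Bool) :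
    ((s.filter p).map (fun v => if v == x then (1 : Int) else 0)).sum
      = if p x then 1 else 0 := by
  induction s with
  | nil => cases hx
  | cons y ys ih =>
    rcases List.nodup_cons.mp hs with ⟨hy, hys⟩
    by_cases hxy : x = y
    · subst hxy
      have hzero : ((ys.filter p).map (fun v => if v == x then (1 : Int) else 0)).sum = 0 := by
        refine List.sum_eq_zero ?_
        intro z hz
        rcases List.mem_map.mp hz with ⟨v, hv, rfl⟩
        have hne : v ≠ x := fun h => hy (h ▸ List.mem_of_mem_filter hv)
        simp [hne]
      by_cases hp : p x = true
      · rw [List.filter_cons_of_pos hp, List.map_cons, List.sum_cons, hzero, if_pos hp]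
        simp
      · rw [List.filter_cons_of_neg (by simp [hp]), hzero, if_neg hp]
    · have hx' : x ∈ ys := by
        rcases List.mem_cons.mp hx with rfl | h
        · exact absurd rfl hxy
        · exact h
      by_cases hp : p y = true
      · rw [List.filter_cons_of_pos hp, List.map_cons, List.sum_cons, ih hys hx']
        have hne : (y == x) = false := by simp [Ne.symm hxy]
        rw [hne]
        simp
      · rw [List.filter_cons_of_neg (by simp [hp]), ih hys hx']

-- summing multiplicities over a covering nodup list of values counts the predicate
theorem pvSumCount (s : List Int) (l : List Int) (hs : s.Nodup) (hl : ∀ v ∈ l, v ∈ s)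
    (p : Int → Bool) :
    ((s.filter p).map (fun v => (l.count v : Int))).sum = (l.countP p : Int) := by
  induction l with
  | nil => simp
  | cons x t ih =>
    have hx : x ∈ s := hl x (List.mem_cons_self)
    have ht : ∀ v ∈ t, v ∈ s := fun v hv => hl v (List.mem_cons_of_mem x hv)
    have hsplit : ((s.filter p).map (fun v => ((x :: t).count v : Int))).sum
        = ((s.filter p).map (fun v => (t.count v : Int))).sum
          + ((s.filter p).map (fun v => if v == x then (1 : Int) else 0)).sum := by
      rw [← PySem.List.sum_map_add_int]
      congr 1
      refine List.map_congr_left ?_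
      intro v _
      by_cases hvx : v = x
      · subst hvx; simp
      · simp [hvx, Ne.symm hvx]
    rw [hsplit, ih ht, pvSumInd s hs x hx p, List.countP_cons]
    by_cases hp : p x = true <;> simp [hp]

-- the inner generator sum over Counter items is a countP over the underlying list
theorem pvRankSum (l : List Int) (p : Int → Bool) :
    (((PySem.Dict.counter l).items.filter (fun q => p q.1)).map
        (fun q : Int × Int => q.2)).sum = (l.countP p : Int) := by
  rw [PySem.Dict.items_counter]
  rw [List.filter_map, List.map_map]
  have h1 : ((fun q : Int × Int => p q.1) ∘ fun k => (k, (l.count k : Int))) = p := rfl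
  have h2 : ((fun q : Int × Int => q.2) ∘ fun k => (k, (l.count k : Int)))
      = fun k => (l.count k : Int) := rfl
  rw [h1, h2]
  exact pvSumCount _ l (PySem.Set.nodup_ofList l)
    (fun v hv => (PySem.Set.mem_ofList l v).mpr hv) p

-- an ascending list read at two ordered indices
theorem pvMono (cs : List Int) (h : cs.Pairwise (· ≤ ·)) (a b : Nat) (hab : a ≤ b)
    (hb : b < cs.length) : cs[a]'(lt_of_le_of_lt hab hb) ≤ cs[b] := by
  rcases Nat.lt_or_ge a b with hlt | hge
  · exact List.pairwise_iff_getElem.mp h a b (lt_of_le_of_lt hab hb) hb hlt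
  · have : a = b := le_antisymm hab hge
    subst this; exact le_refl _

-- in an ascending list: value at index i vs the number of strictly smaller entries
theorem pvCountLt (cs : List Int) (h : cs.Pairwise (· ≤ ·)) (i : Nat) (hi : i < cs.length)
    (c : Int) : c ≤ cs[i] ↔ cs.countP (fun v => decide (v < c)) ≤ i := by
  constructor
  · intro hc
    have hdecomp : cs = cs.take i ++ cs.drop i := (List.take_append_drop i cs).symm
    have hdrop : (cs.drop i).countP (fun v => decide (v < c)) = 0 := by
      refine List.countP_eq_zero.mpr ?_
      intro a ha
      rcases List.mem_iff_getElem.mp ha with ⟨j, hj, rfl⟩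
      rw [List.getElem_drop]
      have := pvMono cs h i (i + j) (Nat.le_add_right i j) (by
        have := List.length_drop (l := cs) (i := i); omega)
      simp only [decide_eq_true_eq]
      omega
    calc cs.countP (fun v => decide (v < c))
        = (cs.take i).countP (fun v => decide (v < c))
          + (cs.drop i).countP (fun v => decide (v < c)) := by
          conv_lhs => rw [hdecomp]
          rw [List.countP_append]
      _ ≤ i := by
          rw [hdrop]
          have := List.countP_le_length (l := cs.take i) (p := fun v => decide (v < c))
          simp only [List.length_take] at this
          omega
  · intro hcount
    by_contra hc
    rw [not_le] at hc
    have hall : (cs.take (i + 1)).countP (fun v => decide (v < c)) = (cs.take (i + 1)).length := by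
      refine List.countP_eq_length.mpr ?_
      intro a ha
      rcases List.mem_iff_getElem.mp ha with ⟨j, hj, rfl⟩
      rw [List.getElem_take]
      have hjlen : j < cs.length := lt_of_lt_of_le hj (by simp [List.length_take])
      have hji : j ≤ i := by simp only [List.length_take] at hj; omega
      have := pvMono cs h j i hji hi
      simp only [decide_eq_true_eq]
      omega
    have hlen : (cs.take (i + 1)).length = i + 1 := by
      simp [List.length_take]; omega
    have : i + 1 ≤ cs.countP (fun v => decide (v < c)) := by
      conv_rhs => rw [(List.take_append_drop (i + 1) cs).symm]
      rw [List.countP_append, hall, hlen]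
      omega
    omega

-- in an ascending list: value at index i vs the number of strictly larger entries
theorem pvCountGt (cs : List Int) (h : cs.Pairwise (· ≤ ·)) (i : Nat) (hi : i < cs.length)
    (c : Int) : cs[i] ≤ c ↔ cs.countP (fun v => decide (c < v)) < cs.length - i := by
  constructor
  · intro hc
    have htake : (cs.take (i + 1)).countP (fun v => decide (c < v)) = 0 := by
      refine List.countP_eq_zero.mpr ?_
      intro a ha
      rcases List.mem_iff_getElem.mp ha with ⟨j, hj, rfl⟩
      rw [List.getElem_take]
      have hji : j ≤ i := by simp only [List.length_take] at hj; omega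
      have := pvMono cs h j i hji hi
      simp only [decide_eq_true_eq]
      omega
    have hdroplen : (cs.drop (i + 1)).length = cs.length - (i + 1) := by simp
    have hdrople := List.countP_le_length (l := cs.drop (i + 1)) (p := fun v => decide (c < v))
    have : cs.countP (fun v => decide (c < v))
        = (cs.take (i + 1)).countP (fun v => decide (c < v))
          + (cs.drop (i + 1)).countP (fun v => decide (c < v)) := by
      conv_lhs => rw [(List.take_append_drop (i + 1) cs).symm]
      rw [List.countP_append]
    omega
  · intro hcount
    by_contra hc
    rw [not_le] at hc
    have hall : (cs.drop i).countP (fun v => decide (c < v)) = (cs.drop i).length := by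
      refine List.countP_eq_length.mpr ?_
      intro a ha
      rcases List.mem_iff_getElem.mp ha with ⟨j, hj, rfl⟩
      rw [List.getElem_drop]
      have := pvMono cs h i (i + j) (Nat.le_add_right i j) (by
        have := List.length_drop (l := cs) (i := i); omega)
      simp only [decide_eq_true_eq]
      omega
    have hdroplen : (cs.drop i).length = cs.length - i := by simp
    have : cs.countP (fun v => decide (c < v))
        = (cs.take i).countP (fun v => decide (c < v))
          + (cs.drop i).countP (fun v => decide (c < v)) := by
      conv_lhs => rw [(List.take_append_drop i cs).symm]
      rw [List.countP_append]
    omega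

-- ===== VERDICT (by name: the statement is the Claim_ definition above) =====
set_option maxHeartbeats 1600000 in
theorem make_hot_cold_due_spec : Claim_equal_make_hot_cold_due := by
  intro history k _
  show make_hot_cold_due history k = make_hot_cold_due_alt history k
  simp only [make_hot_cold_due, make_hot_cold_due_alt, pvFoldlNested,
    PySem.Dict.foldl_insert_getD_add_one_eq_counter, PySem.Dict.values, PySem.Dict.size]
  set items := (PySem.Dict.counter (List.flatMap (fun row => row) (PySem.List.slice history (some (-k))))).items with hitems
  set most := PySem.List.sorted items (fun p => p.2) true with hmost
  set least := PySem.List.sorted2 items (fun p => p.2) (fun p => p.1) with hleast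
  set vals := items.map (fun p => p.2) with hvals
  set cs := PySem.List.sorted vals (fun c => c) with hcs
  have hlm : most.length = items.length := by rw [hmost]; exact PySem.List.length_sorted items _ true
  have hll : least.length = items.length := by
    rw [hleast]; exact (PySem.List.sorted2_perm items (fun p => p.2) (fun p => p.1) false).length_eq
  have hlc : cs.length = items.length := by
    rw [hcs, PySem.List.length_sorted, hvals, List.length_map]
  have hcsPair : cs.Pairwise (· ≤ ·) := by
    rw [hcs]; simpa using PySem.List.sorted_pairwise vals (fun c => c)
  have hperm : cs.Perm vals := by rw [hcs]; exact PySem.List.sorted_perm vals (fun c => c) false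
  have hgt : ∀ c : Int,
      ((((PySem.Dict.counter vals).items.filter (fun q => decide (c < q.1))).map
        (fun p : Int × Int => p.2)).sum) = (cs.countP (fun v => decide (c < v)) : Int) := by
    intro c
    rw [pvRankSum vals (fun v => decide (c < v))]
    exact_mod_cast congrArg Nat.cast (hperm.countP_eq _).symm
  have hlt : ∀ c : Int,
      ((((PySem.Dict.counter vals).items.filter (fun q => decide (q.1 < c))).map
        (fun p : Int × Int => p.2)).sum) = (cs.countP (fun v => decide (v < c)) : Int) := by
    intro c
    rw [pvRankSum vals (fun v => decide (v < c))]
    exact_mod_cast congrArg Nat.cast (hperm.countP_eq _).symm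
  by_cases hne : items.length = 0
  · have hnil : items = [] := List.length_eq_zero_iff.mp hne
    rw [hmost, hleast, hvals, hnil]
    exact Prod.ext (by rfl) (Prod.ext (by rfl) (pvDueEq _))
  · simp only [hlm, hll, ne_eq, hne, not_false_eq_true, if_true]
    have hMne : most ≠ [] := by
      intro h0
      exact hne (by rw [← hlm, h0]; rfl)
    have hsndM : most.map (fun p => p.2) = cs.reverse := by
      rw [hmost, hcs, hvals]; exact pvMostSnd items
    have hsndL : least.map (fun p => p.2) = cs := by
      rw [hleast, hcs, hvals]; exact pvLeastSnd items
    refine Prod.ext ?_ (Prod.ext ?_ ?_)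
    -- hot
    · refine Eq.trans (pvFilterSetEq most items
        (by rw [hmost]; exact PySem.List.sorted_perm items (fun p => p.2) true) _) ?_
      congr 2
      refine congrArg (List.map (fun q : Int × Int => q.1)) (List.filter_congr ?_)
      intro p hp
      rw [hgt p.2]
      have hpm : p.2 ∈ cs := hperm.mem_iff.mpr (by rw [hvals]; exact List.mem_map_of_mem hp)
      by_cases h6 : 6 ≤ items.length
      · rw [if_pos h6]
        have e5 : (PySem.List.pyGetD most 5 (0, 0)).2 = cs[items.length - 6]'(by omega) := by
          rw [PySem.List.pyGetD_ofNat',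
            List.getD_eq_getElem _ _ (by omega : 5 < most.length),
            pvSndGet most cs.reverse hsndM 5 _, List.getElem_reverse]
          congr 1
          omega
        rw [e5, decide_eq_decide, pvCountGt cs hcsPair (items.length - 6) (by omega) p.2]
        constructor <;> intro h <;> omega
      · rw [if_neg h6]
        have e0 : (PySem.List.pyGetD most (-1) (0, 0)).2 = cs[0]'(by omega) := by
          rw [PySem.List.pyGetD_neg_one most _ hMne, List.getLast_eq_getElem,
            pvSndGet most cs.reverse hsndM _ _, List.getElem_reverse]
          congr 1
          omega
        rw [e0, decide_eq_decide]
        obtain ⟨j, hj, hjv⟩ := List.mem_iff_getElem.mp hpm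
        have h0le : cs[0]'(by omega) ≤ p.2 := hjv ▸ pvMono cs hcsPair 0 j (Nat.zero_le j) hj
        have hcle := List.countP_le_length (l := cs) (p := fun v => decide (p.2 < v))
        constructor <;> intro h
        · omega
        · exact h0le
    -- cold
    · refine Eq.trans (pvFilterSetEq least items
        (by rw [hleast]; exact PySem.List.sorted2_perm items (fun p => p.2) (fun p => p.1) false) _) ?_
      congr 2
      refine congrArg (List.map (fun q : Int × Int => q.1)) (List.filter_congr ?_)
      intro p hp
      rw [hlt p.2]
      by_cases h4 : 4 ≤ items.length
      · rw [if_pos h4, if_pos h4]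
        have e3 : (PySem.List.pyGetD least 3 (0, 0)).2 = cs[3]'(by omega) := by
          rw [PySem.List.pyGetD_ofNat',
            List.getD_eq_getElem _ _ (by omega : 3 < least.length),
            pvSndGet least cs hsndL 3 _]
        rw [e3, decide_eq_decide, pvCountLt cs hcsPair 3 (by omega) p.2]
        constructor <;> intro h <;> omega
      · rw [if_neg h4, if_neg h4]
        have e0 : (PySem.List.pyGetD least 0 (0, 0)).2 = cs[0]'(by omega) := by
          rw [PySem.List.pyGetD_zero,
            List.getD_eq_getElem _ _ (by omega : 0 < least.length),
            pvSndGet least cs hsndL 0 _]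
        rw [e0, decide_eq_decide, pvCountLt cs hcsPair 0 (by omega) p.2]
        constructor <;> intro h <;> omega
    -- due
    · exact pvDueEq _
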